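-- pv_equiv track=rewrite | github.com/Virus936/AOC | year_2024/day02.py | is_safe_origin
-- ===== SOURCE A (Python) =====
-- def is_safe_origin(line):
--     count = 0
--     count2 = 0
--
--     for i in range(1, len(line)):
--         if line[i - 1] > line[i] > line[i - 1] - 4:
--             count += 1
--         if line[i - 1] < line[i] < line[i - 1] + 4:
--             count2 += 1
--     if count == len(line) - 1:
--         return True
--     if count2 == len(line) - 1:
--         return True
--     return False
-- ===== SOURCE B (Python) =====
-- def _walk(line, sign):
--     # verify the already-chosen direction, failing fast at the first bad step
--     prev = line[0]
--     for cur in line[1:]: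
--         d = sign * (cur - prev)
--         if d < 1 or d > 3:
--             return False
--         prev = cur
--     return True
--
--
-- def is_safe_origin(line):
--     if len(line) < 2:
--         return True
--     d0 = line[1] - line[0]
--     if d0 == 0:
--         return False
--     return _walk(line, 1 if d0 > 0 else -1)
-- ===== Notes on version B (the rewrite author's own statement) =====
-- stated objective: faster
-- what changed: Instead of A's two full symmetric counts compared to len-1, B commits to a direction from the sign of the first difference and verifies only that direction in a single pass that exits at the first bad step (so unsafe reports are rejected without scanning the rest).
-- intended difference: On the empty list A returns False only because its counter comparison 0 == len(line)-1 == -1 fails (an off-by-one artefact), while B returns True, the intended vacuous answer for a report with no adjacent pair. — e.g. on is_safe_origin([]): A returns false, B returns true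
import Mathlib
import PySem

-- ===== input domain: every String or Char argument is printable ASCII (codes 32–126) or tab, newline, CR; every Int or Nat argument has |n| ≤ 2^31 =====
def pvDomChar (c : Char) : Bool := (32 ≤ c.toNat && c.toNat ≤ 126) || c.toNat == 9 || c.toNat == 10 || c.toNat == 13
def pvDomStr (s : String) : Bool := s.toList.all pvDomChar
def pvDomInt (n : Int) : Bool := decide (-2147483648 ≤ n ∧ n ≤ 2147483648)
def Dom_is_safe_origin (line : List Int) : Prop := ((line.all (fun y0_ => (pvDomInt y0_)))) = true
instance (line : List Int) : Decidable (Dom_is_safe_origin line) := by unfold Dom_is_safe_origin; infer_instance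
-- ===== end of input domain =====

-- B commits to a direction decided by the first pair and verifies it in a single
-- early-exit pass, instead of A's two full symmetric counts compared to len-1.
-- ===== PORT A =====
def is_safe_origin (line : List Int) : Bool :=
  let r := (PySem.List.pyRange 1 (line.length : Int) 1).foldl
    (fun (acc : Int × Int) i =>
      let acc := if PySem.List.pyGetD line (i-1) 0 > PySem.List.pyGetD line i 0 ∧
                    PySem.List.pyGetD line i 0 > PySem.List.pyGetD line (i-1) 0 - 4
                 then (acc.1 + 1, acc.2) else acc
      if PySem.List.pyGetD line (i-1) 0 < PySem.List.pyGetD line i 0 ∧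
         PySem.List.pyGetD line i 0 < PySem.List.pyGetD line (i-1) 0 + 4
      then (acc.1, acc.2 + 1) else acc)
    (0, 0)
  if r.1 = (line.length : Int) - 1 then true
  else if r.2 = (line.length : Int) - 1 then true
  else false

-- ===== PORT B =====
-- the for-loop of _walk, carrying `prev`, with early exit at the first bad step
def walkHelper (sign : Int) : Int → List Int → Bool
  | _, [] => true
  | prev, cur :: rest =>
      let d := sign * (cur - prev)
      if d < 1 ∨ d > 3 then false else walkHelper sign cur rest

def is_safe_origin_alt (line : List Int) : Bool :=
  match line with
  | [] => true
  | [_] => true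
  | x :: y :: _ =>
      let d0 := y - x
      if d0 = 0 then false
      else walkHelper (if d0 > 0 then 1 else -1) x (line.drop 1)

-- ===== PRECONDITION & SPEC =====
-- On the empty list A returns False only because its counter comparison 0 == len(line)-1 == -1
-- fails (an off-by-one artefact), while B returns True, the intended vacuous answer for a report
-- with no adjacent pair.
def D_is_safe_origin (line : List Int) : Prop := line = []
instance (line : List Int) : Decidable (D_is_safe_origin line) := by unfold D_is_safe_origin; infer_instance
def Spec_is_safe_origin (line : List Int) (out : Bool) : Prop := ¬ D_is_safe_origin line → out = is_safe_origin_alt line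
instance (line : List Int) (out : Bool) : Decidable (Spec_is_safe_origin line out) := by unfold Spec_is_safe_origin; infer_instance
def pvDiffWitness_is_safe_origin : List Int := []
def pvDiffWitnessOut_is_safe_origin : Bool × Bool := (false, true)

-- ===== CLAIM (what is proved, stated in full; the proofs are below) =====
def Claim_unchanged_is_safe_origin : Prop := ∀ (line : List Int), Dom_is_safe_origin line → Spec_is_safe_origin line (is_safe_origin line)
def Claim_changed_is_safe_origin : Prop := Dom_is_safe_origin (pvDiffWitness_is_safe_origin) ∧ D_is_safe_origin (pvDiffWitness_is_safe_origin) ∧ is_safe_origin (pvDiffWitness_is_safe_origin) = pvDiffWitnessOut_is_safe_origin.1 ∧ is_safe_origin_alt (pvDiffWitness_is_safe_origin) = pvDiffWitnessOut_is_safe_origin.2 ∧ pvDiffWitnessOut_is_safe_origin.1 ≠ pvDiffWitnessOut_is_safe_origin.2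
def Claim_exact_is_safe_origin : Prop := ∀ (line : List Int), Dom_is_safe_origin line → D_is_safe_origin line → is_safe_origin line ≠ is_safe_origin_alt line

-- ===== LEMMAS AND PROOFS =====

-- shifting the index loop one position down a cons cell
lemma fold_shift {σ : Type} (f : σ → Int → Int → σ) (x : Int) (ys : List Int) (init : σ) :
    (PySem.List.pyRange 2 ((x::ys).length : Int) 1).foldl
      (fun acc i => f acc (PySem.List.pyGetD (x::ys) (i-1) 0) (PySem.List.pyGetD (x::ys) i 0)) init
    = (PySem.List.pyRange 1 (ys.length : Int) 1).foldl
      (fun acc i => f acc (PySem.List.pyGetD ys (i-1) 0) (PySem.List.pyGetD ys i 0)) init := by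
  rw [PySem.List.pyRange_one 2, PySem.List.pyRange_one 1]
  have hlen : (((x::ys).length : Int) - 2).toNat = ((ys.length : Int) - 1).toNat := by
    simp; omega
  rw [hlen, List.foldl_map, List.foldl_map]
  congr 1
  funext acc k
  have h1 : (2 + (k:Int)) - 1 = ((k+1 : Nat) : Int) := by push_cast; ring
  have h2 : (2 + (k:Int)) = ((k+2 : Nat) : Int) := by push_cast; ring
  have h3 : (1 + (k:Int)) - 1 = ((k : Nat) : Int) := by push_cast; ring
  have h4 : (1 + (k:Int)) = ((k+1 : Nat) : Int) := by push_cast; ring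
  rw [h1, h2, h3, h4, PySem.List.pyGetD_natCast, PySem.List.pyGetD_natCast,
      PySem.List.pyGetD_natCast, PySem.List.pyGetD_natCast]
  simp [List.getD]

-- the index loop over range(1, len) visits exactly the adjacent pairs
lemma fold_pairs {σ : Type} (f : σ → Int → Int → σ) :
    ∀ (line : List Int) (init : σ),
    (PySem.List.pyRange 1 (line.length : Int) 1).foldl
      (fun acc i => f acc (PySem.List.pyGetD line (i-1) 0) (PySem.List.pyGetD line i 0)) init
    = (line.zip (line.drop 1)).foldl (fun acc p => f acc p.1 p.2) init := by
  intro line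
  induction line with
  | nil => intro init; simp [PySem.List.pyRange_one_eq_nil]
  | cons x ys ih =>
    intro init
    cases ys with
    | nil => simp [PySem.List.pyRange_one_eq_nil]
    | cons y xs =>
      rw [PySem.List.pyRange_one_cons (by simp)]
      simp only [List.foldl_cons]
      have hx : PySem.List.pyGetD (x::y::xs) ((1:Int)-1) 0 = x := by
        have h0 : ((1:Int)-1) = ((0:Nat):Int) := by norm_num
        rw [h0, PySem.List.pyGetD_natCast]; simp [List.getD]
      have hy : PySem.List.pyGetD (x::y::xs) (1:Int) 0 = y := by
        have : (1:Int) = ((1:Nat) : Int) := by norm_num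
        rw [this, PySem.List.pyGetD_natCast]; simp [List.getD]
      rw [hx, hy]
      simp only [show (1:Int)+1 = 2 from rfl]
      rw [fold_shift f x (y::xs), ih]
      simp

-- the counting step, characterised by countP
lemma count_fold (ps : List (Int × Int)) : ∀ (c1 c2 : Int),
    ps.foldl (fun (acc : Int × Int) p =>
      let acc := if p.1 > p.2 ∧ p.2 > p.1 - 4 then (acc.1 + 1, acc.2) else acc
      if p.1 < p.2 ∧ p.2 < p.1 + 4 then (acc.1, acc.2 + 1) else acc) (c1, c2)
    = (c1 + (ps.countP (fun p => decide (p.1 > p.2 ∧ p.2 > p.1 - 4)) : Int),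
       c2 + (ps.countP (fun p => decide (p.1 < p.2 ∧ p.2 < p.1 + 4)) : Int)) := by
  induction ps with
  | nil => intro c1 c2; simp
  | cons p ps ih =>
    intro c1 c2
    simp only [List.foldl_cons, List.countP_cons]
    by_cases h1 : p.1 > p.2 ∧ p.2 > p.1 - 4 <;>
      by_cases h2 : p.1 < p.2 ∧ p.2 < p.1 + 4 <;>
        simp [h1, h2, ih, Prod.ext_iff] <;> push_cast <;> omega

lemma countP_full_iff (ps : List (Int × Int)) (q : Int × Int → Bool) (n : Int)
    (hn : n = (ps.length : Int)) :
    ((ps.countP q : Int) = n) ↔ ps.all q = true := by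
  subst hn
  rw [List.all_eq_true]
  constructor
  · intro h a ha
    have := List.countP_eq_length.mp (by exact_mod_cast h)
    exact this a ha
  · intro h
    exact_mod_cast List.countP_eq_length.mpr h

-- the prev-carrying verification loop, characterised over the adjacent pairs
lemma walk_eq_all (sign : Int) :
    ∀ (rest : List Int) (prev : Int),
    walkHelper sign prev rest
      = ((prev :: rest).zip rest).all
          (fun p => decide (1 ≤ sign * (p.2 - p.1) ∧ sign * (p.2 - p.1) ≤ 3)) := by
  intro rest
  induction rest with
  | nil => intro prev; simp [walkHelper]
  | cons cur rest ih =>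
    intro prev
    rw [walkHelper]
    simp only [List.zip_cons_cons, List.all_cons]
    rw [ih]
    split_ifs with h
    · have hd : decide (1 ≤ sign * (cur - prev) ∧ sign * (cur - prev) ≤ 3) = false := by
        simp only [decide_eq_false_iff_not]; omega
      rw [hd, Bool.false_and]
    · have hd : decide (1 ≤ sign * (cur - prev) ∧ sign * (cur - prev) ≤ 3) = true := by
        simp only [decide_eq_true_eq]; omega
      rw [hd, Bool.true_and]

-- A on a nonempty list, characterised as the disjunction of the two directed all-checks
lemma A_eq_two_all (x : Int) (ys : List Int) :
    is_safe_origin (x::ys)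
      = (((x::ys).zip ys).all
            (fun p => decide (1 ≤ (1:Int) * (p.2 - p.1) ∧ (1:Int) * (p.2 - p.1) ≤ 3))
         || ((x::ys).zip ys).all
            (fun p => decide (1 ≤ (-1:Int) * (p.2 - p.1) ∧ (-1:Int) * (p.2 - p.1) ≤ 3))) := by
  unfold is_safe_origin
  rw [fold_pairs (fun (acc : Int × Int) a b =>
      let acc := if a > b ∧ b > a - 4 then (acc.1 + 1, acc.2) else acc
      if a < b ∧ b < a + 4 then (acc.1, acc.2 + 1) else acc)]
  simp only [count_fold, Int.zero_add, List.drop_succ_cons, List.drop_zero]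
  set ps := (x::ys).zip ys with hps
  have hlen : ((x::ys).length : Int) - 1 = (ps.length : Int) := by
    simp [hps, List.length_zip]
  simp only [hlen]
  have m1 : ps.all (fun p => decide (1 ≤ (1:Int) * (p.2 - p.1) ∧ (1:Int) * (p.2 - p.1) ≤ 3))
      = ps.all (fun p => decide (p.1 < p.2 ∧ p.2 < p.1 + 4)) := by
    congr 1
    funext p
    exact decide_eq_decide.mpr (by constructor <;> intro h <;> omega)
  have m2 : ps.all (fun p => decide (1 ≤ (-1:Int) * (p.2 - p.1) ∧ (-1:Int) * (p.2 - p.1) ≤ 3))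
      = ps.all (fun p => decide (p.1 > p.2 ∧ p.2 > p.1 - 4)) := by
    congr 1
    funext p
    exact decide_eq_decide.mpr (by constructor <;> intro h <;> omega)
  rw [m1, m2]
  split_ifs with h1 h2
  · rw [(countP_full_iff ps _ _ rfl).mp h1, Bool.or_true]
  · rw [(countP_full_iff ps _ _ rfl).mp h2, Bool.true_or]
  · have hA : ps.all (fun p => decide (p.1 < p.2 ∧ p.2 < p.1 + 4)) = false := by
      cases hc : ps.all (fun p => decide (p.1 < p.2 ∧ p.2 < p.1 + 4)) with
      | false => rfl
      | true => exact absurd ((countP_full_iff ps _ _ rfl).mpr hc) h2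
    have hB : ps.all (fun p => decide (p.1 > p.2 ∧ p.2 > p.1 - 4)) = false := by
      cases hc : ps.all (fun p => decide (p.1 > p.2 ∧ p.2 > p.1 - 4)) with
      | false => rfl
      | true => exact absurd ((countP_full_iff ps _ _ rfl).mpr hc) h1
    rw [hA, hB]; rfl

-- the first pair falsifies the direction the sign contradicts
lemma first_pair_false (x y : Int) (xs : List Int) (sign : Int)
    (h : ¬ (1 ≤ sign * (y - x) ∧ sign * (y - x) ≤ 3)) :
    ((x::y::xs).zip (y::xs)).all
        (fun p => decide (1 ≤ sign * (p.2 - p.1) ∧ sign * (p.2 - p.1) ≤ 3)) = false := by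
  simp only [List.zip_cons_cons, List.all_cons]
  have hd : decide (1 ≤ sign * (y - x) ∧ sign * (y - x) ≤ 3) = false := by
    simp only [decide_eq_false_iff_not]; exact h
  rw [hd, Bool.false_and]

-- ===== VERDICT (by name: the statement is the Claim_ definition above) =====
theorem is_safe_origin_spec : Claim_unchanged_is_safe_origin := by
  intro line _ hD
  unfold D_is_safe_origin at hD
  obtain ⟨x, ys, rfl⟩ : ∃ x ys, line = x :: ys := by
    cases line with
    | nil => exact absurd rfl hD
    | cons a b => exact ⟨a, b, rfl⟩
  show is_safe_origin (x::ys) = is_safe_origin_alt (x::ys)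
  rw [A_eq_two_all]
  cases ys with
  | nil => rfl
  | cons y xs =>
    show _ = (let d0 := y - x
              if d0 = 0 then false
              else walkHelper (if d0 > 0 then 1 else -1) x ((x::y::xs).drop 1))
    simp only [List.drop_succ_cons, List.drop_zero]
    rcases lt_trichotomy (y - x) 0 with h | h | h
    · rw [if_neg (by omega), if_neg (by omega), walk_eq_all,
          first_pair_false x y xs 1 (by omega), Bool.false_or]
    · rw [if_pos (by omega), first_pair_false x y xs 1 (by omega),
          first_pair_false x y xs (-1) (by omega), Bool.false_or]
    · rw [if_neg (by omega), if_pos (by omega), walk_eq_all,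
          first_pair_false x y xs (-1) (by omega), Bool.or_false]

theorem is_safe_origin_changed : Claim_changed_is_safe_origin := by
  unfold Claim_changed_is_safe_origin; decide

theorem is_safe_origin_tight : Claim_exact_is_safe_origin := by
  intro line _ hD
  unfold D_is_safe_origin at hD
  subst hD
  decide
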